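-- pv_equiv track=rewrite | github.com/d89012255/asr_demo1218 | predict_speech_file12.py | post_prrocess_3_normal
-- ===== SOURCE A (Python) =====
-- def post_prrocess_3_normal(input):
--     last_dot = ["ang","ia"]
--     next_dot = ["ia","ia"]
--     last_page = ["ang","e"]
--     last_team = ["ang","u"]
--     next_page = ["ia","e"]
--     next_team = ["ia","u"]
--     mix = [
--     last_dot,next_dot,last_page,last_team,next_page,next_team]
--     table= ["上一點","下一點","上一頁","上一組",
--     "下一頁","下一組"]
--     all = ""
--     for i in range(len(input)):
--         all+=(input[i][:-1]+" ")
--     temp_for_check = all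
--     for i in range(len(mix)):
--         temp_for_check = all
--         for b in range(len(mix[i])):
--
--             if(mix[i][b] in temp_for_check):
--                 temp_for_check = temp_for_check[temp_for_check.find(mix[i][b])+len(mix[i][b]):]
--
--                 if(b==len(mix[i])-1):
--                     return str(table[i])
--             else:
--                 break
--             continue
--     return "無法辨識"
-- ===== SOURCE B (Python) =====
-- def post_prrocess_3_normal(input):
--     text = "".join(w[:-1] + " " for w in input)
--     end_ang = end_ia = None
--     ang_ia = ang_e = ang_u = ia_ia = ia_e = ia_u = False
--     # single left-to-right scan over character positions: record the end of the
--     # first "ang"/"ia" occurrence, and which second tokens start at or after it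
--     for j in range(len(text)):
--         ang_ok = end_ang is not None and end_ang <= j
--         ia_ok = end_ia is not None and end_ia <= j
--         hit_ia = text.startswith("ia", j)
--         hit_e = text.startswith("e", j)
--         hit_u = text.startswith("u", j)
--         ang_ia = ang_ia or (ang_ok and hit_ia)
--         ang_e = ang_e or (ang_ok and hit_e)
--         ang_u = ang_u or (ang_ok and hit_u)
--         ia_ia = ia_ia or (ia_ok and hit_ia)
--         ia_e = ia_e or (ia_ok and hit_e)
--         ia_u = ia_u or (ia_ok and hit_u)
--         if end_ang is None and text.startswith("ang", j):
--             end_ang = j + 3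
--         if end_ia is None and hit_ia:
--             end_ia = j + 2
--     if ang_ia:
--         return "上一點"
--     if ia_ia:
--         return "下一點"
--     if ang_e:
--         return "上一頁"
--     if ang_u:
--         return "上一組"
--     if ia_e:
--         return "下一頁"
--     if ia_u:
--         return "下一組"
--     return "無法辨識"
-- ===== Notes on version B (the rewrite author's own statement) =====
-- stated objective: alternative
-- what changed: A repeatedly calls find and slices a shrinking copy of the text for each of the six patterns; B makes one left-to-right pass over the character positions with an accumulator (the end of the first 'ang'/'ia' occurrence plus six match flags updated via startswith at each position) and then reads the answer off the flags in priority order.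
import Mathlib
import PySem

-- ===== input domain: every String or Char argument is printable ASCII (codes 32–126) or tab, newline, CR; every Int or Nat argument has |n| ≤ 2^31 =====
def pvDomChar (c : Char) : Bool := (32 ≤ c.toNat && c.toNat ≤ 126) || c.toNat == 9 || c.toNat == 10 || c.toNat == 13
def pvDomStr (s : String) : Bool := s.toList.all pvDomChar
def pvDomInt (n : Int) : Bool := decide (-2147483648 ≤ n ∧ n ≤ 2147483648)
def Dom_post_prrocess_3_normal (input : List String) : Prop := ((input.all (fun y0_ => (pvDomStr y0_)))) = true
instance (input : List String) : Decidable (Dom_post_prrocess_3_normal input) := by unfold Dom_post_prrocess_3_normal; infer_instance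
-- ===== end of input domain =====

-- B replaces A's nested find/slice rescanning with a single left-to-right scan over
-- character positions that accumulates, in one pass, the end of the first "ang"/"ia"
-- occurrence and which second tokens start at or after it; objective: alternative.

-- ===== PORT A =====
-- A's `mix` (each command pattern, tokens truncated to their stems) and `table` (labels).
def pvMixA : List (List (List Char)) :=
  [["ang".toList, "ia".toList], ["ia".toList, "ia".toList], ["ang".toList, "e".toList],
   ["ang".toList, "u".toList], ["ia".toList, "e".toList], ["ia".toList, "u".toList]]

def pvTableA : List String := ["上一點", "下一點", "上一頁", "上一組", "下一頁", "下一組"]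

-- `all += input[i][:-1] + " "` over range(len(input))
def pvAllA (input : List String) : List Char :=
  input.foldl (fun acc s => acc ++ (PySem.Chars.slice s.toList none (some (-1)) ++ [' '])) []

-- inner `for b in range(len(mix[i]))`: on a hit cut temp after the first occurrence and go on,
-- return (true) when the last part also hits, break (false) on the first miss
def pvInnerA : List (List Char) → List Char → Bool
  | [], _ => false
  | [p], temp => PySem.Chars.isIn p temp
  | p :: ps, temp =>
      if PySem.Chars.isIn p temp then
        pvInnerA ps (PySem.Chars.slice temp (some (PySem.Chars.find temp p + p.length)) none)
      else false

-- outer `for i in range(len(mix))`: return table[i] on the first fully matching pattern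
def pvOuterA : List (List (List Char)) → List String → List Char → String
  | pat :: pats, lbl :: lbls, al => if pvInnerA pat al then lbl else pvOuterA pats lbls al
  | _, _, _ => "無法辨識"

def post_prrocess_3_normal (input : List String) : String :=
  pvOuterA pvMixA pvTableA (pvAllA input)

-- ===== PORT B =====
-- `text = "".join(w[:-1] + " " for w in input)`
def pvTextB (input : List String) : List Char :=
  (input.map (fun w => PySem.Chars.slice w.toList none (some (-1)) ++ [' '])).flatten

-- the scan state: ends of the first "ang"/"ia" occurrence, six match flags
structure PvSt where
  endAng : Option Nat
  endIa : Option Nat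
  angIa : Bool
  iaIa : Bool
  angE : Bool
  angU : Bool
  iaE : Bool
  iaU : Bool
  deriving Repr, DecidableEq

-- `text.startswith(tok, j)`
def pvSw (t : List Char) (j : Nat) (p : List Char) : Bool :=
  PySem.Chars.startswith (t.drop j) p

-- loop body of Source B's `for j in range(len(text))`
def pvStep (t : List Char) (st : PvSt) (j : Nat) : PvSt :=
  let angOk := st.endAng.elim false (fun e => decide (e ≤ j))
  let iaOk := st.endIa.elim false (fun e => decide (e ≤ j))
  let hitIa := pvSw t j "ia".toList
  let hitE := pvSw t j "e".toList
  let hitU := pvSw t j "u".toList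
  { endAng := if st.endAng.isNone && pvSw t j "ang".toList then some (j + 3) else st.endAng,
    endIa := if st.endIa.isNone && hitIa then some (j + 2) else st.endIa,
    angIa := st.angIa || (angOk && hitIa),
    iaIa := st.iaIa || (iaOk && hitIa),
    angE := st.angE || (angOk && hitE),
    angU := st.angU || (angOk && hitU),
    iaE := st.iaE || (iaOk && hitE),
    iaU := st.iaU || (iaOk && hitU) }

def pvScan (t : List Char) : PvSt :=
  (List.range t.length).foldl (pvStep t) ⟨none, none, false, false, false, false, false, false⟩

-- final if-chain of Source B
def post_prrocess_3_normal_alt (input : List String) : String :=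
  let st := pvScan (pvTextB input)
  if st.angIa then "上一點"
  else if st.iaIa then "下一點"
  else if st.angE then "上一頁"
  else if st.angU then "上一組"
  else if st.iaE then "下一頁"
  else if st.iaU then "下一組"
  else "無法辨識"

-- ===== PRECONDITION & SPEC =====
def Spec_post_prrocess_3_normal (input : List String) (out : String) : Prop := out = post_prrocess_3_normal_alt input
instance (input : List String) (out : String) : Decidable (Spec_post_prrocess_3_normal input out) := by unfold Spec_post_prrocess_3_normal; infer_instance

-- ===== CLAIM =====
def Claim_equal_post_prrocess_3_normal : Prop := ∀ (input : List String), Dom_post_prrocess_3_normal input → Spec_post_prrocess_3_normal input (post_prrocess_3_normal input)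

-- ===== LEMMAS AND PROOFS =====

-- the two text builds agree
lemma pvAll_eq_text (input : List String) : pvAllA input = pvTextB input := by
  unfold pvAllA pvTextB
  rw [PySem.List.foldl_append_eq_flatMap]
  simp [List.flatMap_def]

-- end of the first occurrence of p among positions < n (spec for endAng/endIa)
def pvE (t p : List Char) (n : Nat) : Option Nat :=
  ((List.range n).find? (fun j => pvSw t j p)).map (· + p.length)

-- flag spec: some position in [e, n) where q starts, e the end of p's first occurrence
def pvF (t p q : List Char) (n : Nat) : Bool :=
  match pvE t p n with
  | some e => decide (∃ j < n, e ≤ j ∧ pvSw t j q = true)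
  | none => false

lemma pvE_succ (t p : List Char) (n : Nat) :
    pvE t p (n + 1) = match pvE t p n with
      | some e => some e
      | none => if pvSw t n p then some (n + p.length) else none := by
  unfold pvE
  rw [List.range_succ, List.find?_append]
  cases h : (List.range n).find? (fun j => pvSw t j p)
  · simp [List.find?]; cases hs : pvSw t n p <;> simp
  · simp [List.find?]

lemma pvF_succ (t p q : List Char) (n : Nat) (hp : p ≠ []) :
    pvF t p q (n + 1)
      = (pvF t p q n
          || ((pvE t p n).elim false (fun e => decide (e ≤ n)) && pvSw t n q)) := by
  unfold pvF
  rw [pvE_succ]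
  cases hE : pvE t p n with
  | some e =>
      simp only [Option.elim]
      rw [Bool.eq_iff_iff]
      simp only [Bool.or_eq_true, Bool.and_eq_true, decide_eq_true_iff]
      constructor
      · rintro ⟨j, hjn, hej, hsw⟩
        rcases Nat.lt_succ_iff_lt_or_eq.mp hjn with h | rfl
        · exact Or.inl ⟨j, h, hej, hsw⟩
        · exact Or.inr ⟨hej, hsw⟩
      · rintro (⟨j, hjn, hej, hsw⟩ | ⟨hen, hsw⟩)
        · exact ⟨j, Nat.lt_succ_of_lt hjn, hej, hsw⟩
        · exact ⟨n, Nat.lt_succ_self n, hen, hsw⟩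
  | none =>
      have hlen : 1 ≤ p.length := List.length_pos_iff.mpr hp
      cases hs : pvSw t n p
      · rfl
      · rw [if_pos rfl]
        show decide (∃ j < n + 1, n + p.length ≤ j ∧ pvSw t j q = true) = false
        exact decide_eq_false (by rintro ⟨j, hjn, hej, _⟩; omega)

-- the scan's state after n steps is exactly the (pvE, pvF) specification
lemma pvScan_inv (t : List Char) (n : Nat) :
    (List.range n).foldl (pvStep t) ⟨none, none, false, false, false, false, false, false⟩
      = ⟨pvE t "ang".toList n, pvE t "ia".toList n,
         pvF t "ang".toList "ia".toList n, pvF t "ia".toList "ia".toList n,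
         pvF t "ang".toList "e".toList n, pvF t "ang".toList "u".toList n,
         pvF t "ia".toList "e".toList n, pvF t "ia".toList "u".toList n⟩ := by
  induction n with
  | zero => rfl
  | succ n ih =>
      rw [List.range_succ, List.foldl_append, ih]
      simp only [List.foldl_cons, List.foldl_nil]
      rw [pvF_succ t _ _ n (by decide), pvF_succ t _ _ n (by decide),
          pvF_succ t _ _ n (by decide), pvF_succ t _ _ n (by decide),
          pvF_succ t _ _ n (by decide), pvF_succ t _ _ n (by decide),
          pvE_succ, pvE_succ]
      unfold pvStep
      cases hA : pvE t "ang".toList n <;> cases hI : pvE t "ia".toList n <;>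
        cases hs : pvSw t n "ang".toList <;> cases hi : pvSw t n "ia".toList <;>
        simp

lemma pvSw_iff (t p : List Char) (j : Nat) : pvSw t j p = true ↔ p <+: t.drop j := by
  unfold pvSw
  exact PySem.Chars.startswith_iff _ _

-- position bound: a nonempty prefix of t.drop j forces j < t.length
lemma pvPos_lt (t p : List Char) (j : Nat) (hp : p ≠ []) (h : p <+: t.drop j) :
    j < t.length := by
  have h1 : 1 ≤ p.length := List.length_pos_iff.mpr hp
  have h2 := h.length_le
  have h3 : (t.drop j).length = t.length - j := List.length_drop
  omega

-- pvE at the full length, in terms of A's find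
lemma pvE_final (t p : List Char) (hp : p ≠ []) :
    pvE t p t.length
      = if PySem.Chars.isIn p t then some ((PySem.Chars.find t p).toNat + p.length)
        else none := by
  by_cases h : p <:+: t
  · have hf0 : 0 ≤ PySem.Chars.find t p := (PySem.Chars.find_nonneg_iff t p).2 h
    have hspec := PySem.Chars.find_spec hf0
    rw [if_pos ((PySem.Chars.isIn_iff_infix p t).2 h)]
    have hlt : (PySem.Chars.find t p).toNat < t.length := pvPos_lt t p _ hp hspec.1
    have hfind : (List.range t.length).find? (fun j => pvSw t j p)
        = some (PySem.Chars.find t p).toNat := by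
      refine List.find?_eq_some_iff_getElem.mpr
        ⟨(pvSw_iff t p _).2 hspec.1, (PySem.Chars.find t p).toNat, by simpa using hlt,
         by simp, ?_⟩
      intro j hj
      simp only [List.getElem_range, Bool.not_eq_true']
      cases hc : pvSw t j p
      · rfl
      · exact absurd ((pvSw_iff t p j).1 hc) (hspec.2 j hj)
    unfold pvE
    rw [hfind]; rfl
  · rw [if_neg (by rw [(PySem.Chars.isIn_eq_false_iff p t).2 h]; decide)]
    unfold pvE
    rw [List.find?_eq_none.mpr]
    · rfl
    · intro j hj
      rw [pvSw_iff]
      intro hc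
      exact h ((PySem.Chars.exists_prefix_drop_iff_isIn p t).1 ⟨j, hc⟩ |>
        (PySem.Chars.isIn_iff_infix p t).1)

-- the flag condition over [e, length) is exactly `q in t[e:]`
lemma pvF_window (t q : List Char) (e : Nat) (hq : q ≠ []) :
    decide (∃ j < t.length, e ≤ j ∧ pvSw t j q = true)
      = PySem.Chars.isIn q (t.drop e) := by
  cases hin : PySem.Chars.isIn q (t.drop e)
  · have hno := (PySem.Chars.isIn_eq_false_iff q (t.drop e)).1 hin
    rw [decide_eq_false]
    rintro ⟨j, hjn, hej, hsw⟩
    have hpre := (pvSw_iff t q j).1 hsw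
    have : q <+: (t.drop e).drop (j - e) := by
      rw [List.drop_drop]
      have hje : e + (j - e) = j := by omega
      rw [hje]; exact hpre
    exact hno ((PySem.Chars.isIn_iff_infix q (t.drop e)).1
      ((PySem.Chars.exists_prefix_drop_iff_isIn q (t.drop e)).1 ⟨_, this⟩))
  · have hyes := (PySem.Chars.isIn_iff_infix q (t.drop e)).1 hin
    have : ∃ j', q <+: (t.drop e).drop j' := by
      rw [PySem.Chars.exists_prefix_drop_iff_isIn]; exact hin
    obtain ⟨j', hj'⟩ := this
    rw [List.drop_drop] at hj'
    rw [decide_eq_true]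
    exact ⟨e + j', pvPos_lt t q (e + j') hq hj', by omega, (pvSw_iff t q _).2 hj'⟩

-- A's two-step cut-and-rescan on one pattern [p, q] equals the scan flag
lemma pvFlag_eq (t p q : List Char) (hp : p ≠ []) (hq : q ≠ []) :
    pvF t p q t.length = pvInnerA [p, q] t := by
  unfold pvF
  rw [pvE_final t p hp]
  by_cases h : p <:+: t
  · have hf0 : 0 ≤ PySem.Chars.find t p := (PySem.Chars.find_nonneg_iff t p).2 h
    have hisIn : PySem.Chars.isIn p t = true := (PySem.Chars.isIn_iff_infix p t).2 h
    have hlt : (PySem.Chars.find t p).toNat < t.length :=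
      pvPos_lt t p _ hp (PySem.Chars.find_spec hf0).1
    have hslice : PySem.Chars.slice t (some (PySem.Chars.find t p + (p.length : Int))) none
        = t.drop ((PySem.Chars.find t p).toNat + p.length) := by
      have hcast : PySem.Chars.find t p + (p.length : Int)
          = (((PySem.Chars.find t p).toNat + p.length : Nat) : Int) := by
        omega
      rw [hcast, PySem.Chars.slice_eq_listSlice]
      exact PySem.List.slice_from_natCast t _
    simp only [hisIn, if_true, pvInnerA, hslice]
    exact pvF_window t q _ hq
  · have h1 : PySem.Chars.isIn p t = false := (PySem.Chars.isIn_eq_false_iff p t).2 h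
    simp [pvInnerA, h1]

-- ===== VERDICT =====
theorem post_prrocess_3_normal_spec : Claim_equal_post_prrocess_3_normal := by
  intro input _
  unfold Spec_post_prrocess_3_normal post_prrocess_3_normal post_prrocess_3_normal_alt
  rw [pvAll_eq_text]
  unfold pvScan
  rw [pvScan_inv]
  simp only [pvMixA, pvTableA, pvOuterA]
  rw [pvFlag_eq _ _ _ (by decide) (by decide), pvFlag_eq _ _ _ (by decide) (by decide),
      pvFlag_eq _ _ _ (by decide) (by decide), pvFlag_eq _ _ _ (by decide) (by decide),
      pvFlag_eq _ _ _ (by decide) (by decide), pvFlag_eq _ _ _ (by decide) (by decide)]
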